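-- pv_equiv track=rewrite | github.com/FighterNan/SmartUpdate | scripts/range2prefix.py | range2prefix
-- ===== SOURCE A (Python) =====
-- def range2prefix(begin, end, W):
--     p = {
--         'address': [],
--         'mask': []
--     }
--     while begin <= end:
--         i = 1
--         while i <= W:
--             if begin % (1 << i) != 0 or begin + (1 << i) - 1 > end:
--                 break;
--             i += 1
--         p['address'].append(begin)
--         p['mask'].append(W - i + 1)
--         begin += 1 << (i - 1)
--     return p
-- ===== SOURCE B (Python) =====
-- def _block_exp(begin, end, W):
--     # largest exponent e (clamped at 0): block of 2^e addresses fits in the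
--     # remaining range, is aligned at begin, and respects the width W
--     e = min((end - begin + 1).bit_length() - 1, W)
--     if begin != 0:
--         e = min(e, (begin & -begin).bit_length() - 1)
--     return e if e >= 0 else 0
--
--
-- def range2prefix(begin, end, W):
--     address = []
--     mask = []
--     while begin <= end:
--         e = _block_exp(begin, end, W)
--         address.append(begin)
--         mask.append(W - e)
--         begin += 1 << e
--     return {'address': address, 'mask': mask}
-- ===== Notes on version B (the rewrite author's own statement) =====
-- stated objective: simpler
-- what changed: The O(W) inner scanning loop of A is replaced by a closed-form O(1) computation of the block exponent per emitted prefix, via bit_length and the lowest-set-bit trick (begin & -begin).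
import Mathlib
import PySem

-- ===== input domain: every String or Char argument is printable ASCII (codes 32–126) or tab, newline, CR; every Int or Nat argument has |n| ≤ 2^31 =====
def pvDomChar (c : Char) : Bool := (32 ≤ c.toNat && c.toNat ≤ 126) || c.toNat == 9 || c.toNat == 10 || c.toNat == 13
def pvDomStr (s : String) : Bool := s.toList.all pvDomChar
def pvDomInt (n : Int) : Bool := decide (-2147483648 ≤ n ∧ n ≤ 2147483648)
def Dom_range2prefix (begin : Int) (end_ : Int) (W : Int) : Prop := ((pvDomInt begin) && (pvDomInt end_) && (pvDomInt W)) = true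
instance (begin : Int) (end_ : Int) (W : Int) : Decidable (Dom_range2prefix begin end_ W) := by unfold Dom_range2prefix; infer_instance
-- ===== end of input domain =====

-- B replaces A's O(W) inner scanning loop by a closed-form per-step block-exponent
-- computation (bit_length / lowest set bit); objective: simpler.


-- ===== PORT A =====
-- inner 'while i <= W' loop of A; '1 << i' (i ≥ 0) is 2 ^ i.toNat; '%' is Python floor mod
def r2pInner (begin : Int) (end_ : Int) (W : Int) (i : Int) : Int :=
  if hiW : i ≤ W then
    if PySem.Int.mod begin (2 ^ i.toNat) ≠ 0 ∨ begin + 2 ^ i.toNat - 1 > end_ then i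
    else r2pInner begin end_ W (i + 1)
  else i
termination_by (W + 1 - i).toNat
decreasing_by omega

-- outer 'while begin <= end' loop; the two growing dict values as accumulators
def r2pOuter (begin : Int) (end_ : Int) (W : Int) (addr : List Int) (mask : List Int) :
    List Int × List Int :=
  if _h : begin ≤ end_ then
    let i := r2pInner begin end_ W 1
    r2pOuter (begin + 2 ^ (i - 1).toNat) end_ W (addr ++ [begin]) (mask ++ [W - i + 1])
  else (addr, mask)
termination_by (end_ + 1 - begin).toNat
decreasing_by
  have : (0 : Int) < 2 ^ ((r2pInner begin end_ W 1) - 1).toNat := pow_pos (by norm_num) _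
  omega

def range2prefix (begin : Int) (end_ : Int) (W : Int) : List (String × List Int) :=
  let p := r2pOuter begin end_ W [] []
  [("address", p.1), ("mask", p.2)]

-- ===== PORT B =====
-- n.bit_length() for n ≥ 0 is Nat.size
def pyBitLength (n : Int) : Int := (n.natAbs.size : Int)

-- _block_exp of Source B
def blockExp (begin : Int) (end_ : Int) (W : Int) : Int :=
  let e0 := min (pyBitLength (end_ - begin + 1) - 1) W
  let e1 := if begin ≠ 0 then min e0 (pyBitLength (Int.land begin (-begin)) - 1) else e0
  if 0 ≤ e1 then e1 else 0

def r2pLoop (begin : Int) (end_ : Int) (W : Int) : List Int × List Int :=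
  if _h : begin ≤ end_ then
    let e := blockExp begin end_ W
    let rest := r2pLoop (begin + 2 ^ e.toNat) end_ W
    (begin :: rest.1, (W - e) :: rest.2)
  else ([], [])
termination_by (end_ + 1 - begin).toNat
decreasing_by
  have : (0 : Int) < 2 ^ (blockExp begin end_ W).toNat := pow_pos (by norm_num) _
  omega

def range2prefix_alt (begin : Int) (end_ : Int) (W : Int) : List (String × List Int) :=
  let p := r2pLoop begin end_ W
  [("address", p.1), ("mask", p.2)]

-- ===== PRECONDITION & SPEC =====
def Spec_range2prefix (begin : Int) (end_ : Int) (W : Int) (out : List (String × List Int)) : Prop := out = range2prefix_alt begin end_ W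
instance (begin : Int) (end_ : Int) (W : Int) (out : List (String × List Int)) : Decidable (Spec_range2prefix begin end_ W out) := by unfold Spec_range2prefix; infer_instance

-- ===== CLAIM (what is proved, stated in full; the proofs are below) =====
def Claim_equal_range2prefix : Prop := ∀ (begin : Int) (end_ : Int) (W : Int), Dom_range2prefix begin end_ W → Spec_range2prefix begin end_ W (range2prefix begin end_ W)


-- ===== LEMMAS AND PROOFS =====

-- Nat.ldiff a (a-1) is the lowest set bit of a (a ≥ 1): a power of two exactly dividing a
theorem ldiff_pred_lowbit (a : Nat) (ha : 1 ≤ a) :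
    ∃ t, Nat.ldiff a (a - 1) = 2 ^ t ∧ 2 ^ t ∣ a ∧ ¬ 2 ^ (t + 1) ∣ a := by
  induction a using Nat.strong_induction_on with
  | _ a ih =>
    rcases Nat.even_or_odd a with he | ho
    · obtain ⟨m, hm⟩ := he
      have hm1 : 1 ≤ m := by omega
      obtain ⟨t, h1, h2, h3⟩ := ih m (by omega) hm1
      refine ⟨t + 1, ?_, ?_, ?_⟩
      · apply Nat.eq_of_testBit_eq
        intro i
        cases i with
        | zero =>
          have e0 : a % 2 = 0 := by omega
          have e1 : (a - 1) % 2 = 1 := by omega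
          rw [Nat.testBit_ldiff, Nat.testBit_two_pow, Nat.testBit_zero, Nat.testBit_zero, e0, e1]
          simp
        | succ k =>
          have e1 : a / 2 = m := by omega
          have e2 : (a - 1) / 2 = m - 1 := by omega
          rw [Nat.testBit_ldiff, Nat.testBit_add_one, Nat.testBit_add_one, e1, e2,
            ← Nat.testBit_ldiff, h1, Nat.testBit_two_pow, Nat.testBit_two_pow]
          simp only [decide_eq_decide]
          omega
      · obtain ⟨c, hc⟩ := h2
        refine ⟨c, ?_⟩
        have h' : 2 ^ (t + 1) * c = 2 * (2 ^ t * c) := by ring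
        omega
      · rintro ⟨c, hc⟩
        apply h3
        refine ⟨c, ?_⟩
        have h' : 2 ^ (t + 1 + 1) * c = 2 * (2 ^ (t + 1) * c) := by ring
        omega
    · have e0 : a % 2 = 1 := Nat.odd_iff.mp ho
      refine ⟨0, ?_, one_dvd _, ?_⟩
      · apply Nat.eq_of_testBit_eq
        intro i
        cases i with
        | zero =>
          have e1 : (a - 1) % 2 = 0 := by omega
          rw [Nat.testBit_ldiff, Nat.testBit_zero, Nat.testBit_zero, e0, e1]
          simp
        | succ k =>
          have e2 : (a - 1) / 2 = a / 2 := by omega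
          rw [Nat.testBit_ldiff, Nat.testBit_add_one, Nat.testBit_add_one, e2]
          simp [Nat.testBit_add_one]
      · rw [pow_one]
        omega

-- fit: 2^j ≤ n  ↔  j ≤ bit_length n - 1, for n ≥ 1
theorem fit_char (n : Int) (hn : 1 ≤ n) (j : Int) (hj : 0 ≤ j) :
    ((2 : Int) ^ j.toNat ≤ n ↔ j ≤ pyBitLength n - 1) := by
  obtain ⟨m, rfl⟩ : ∃ m : Nat, n = (m : Int) := ⟨n.toNat, (Int.toNat_of_nonneg (by omega)).symm⟩
  have h1 : ((2 : Int) ^ j.toNat ≤ (m : Int)) ↔ (2 : Nat) ^ j.toNat ≤ m := by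
    exact_mod_cast Iff.rfl
  rw [h1, pyBitLength, Int.natAbs_natCast, ← Nat.lt_size]
  omega

-- b & -b computed on the two's-complement representation is ldiff |b| (|b|-1)
theorem land_neg_self (b : Int) (hb : b ≠ 0) :
    Int.land b (-b) = ((Nat.ldiff b.natAbs (b.natAbs - 1) : Nat) : Int) := by
  cases b with
  | ofNat m =>
    cases m with
    | zero => simp at hb
    | succ k => rfl
  | negSucc m => rfl

-- align: 2^j ∣ b  ↔  j ≤ bit_length (b & -b) - 1, for b ≠ 0
theorem align_char (b : Int) (hb : b ≠ 0) (j : Int) (hj : 0 ≤ j) :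
    ((2 : Int) ^ j.toNat ∣ b ↔ j ≤ pyBitLength (Int.land b (-b)) - 1) := by
  have ha : 1 ≤ b.natAbs := by
    have := Int.natAbs_eq_zero.not.mpr hb
    omega
  obtain ⟨t, h1, h2, h3⟩ := ldiff_pred_lowbit b.natAbs ha
  rw [land_neg_self b hb, h1, pyBitLength, Int.natAbs_natCast, Nat.size_pow]
  have hd : ((2 : Int) ^ j.toNat ∣ b) ↔ (2 : Nat) ^ j.toNat ∣ b.natAbs := by
    rw [← Int.natAbs_dvd_natAbs]
    norm_num
  rw [hd]
  constructor
  · intro h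
    by_contra hgt
    have hjt : t + 1 ≤ j.toNat := by omega
    exact h3 (dvd_trans (pow_dvd_pow 2 hjt) h)
  · intro h
    exact dvd_trans (pow_dvd_pow 2 (by omega : j.toNat ≤ t)) h2

theorem blockExp_nonneg (b e_ W : Int) : 0 ≤ blockExp b e_ W := by
  simp only [blockExp]
  split_ifs <;> omega

-- continuation condition of A's inner loop  ↔  j ≤ blockExp, for 1 ≤ j
theorem cont_char (b e_ W : Int) (hbe : b ≤ e_) (j : Int) (hj : 1 ≤ j) :
    ((j ≤ W ∧ PySem.Int.mod b (2 ^ j.toNat) = 0 ∧ b + 2 ^ j.toNat - 1 ≤ e_)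
      ↔ j ≤ blockExp b e_ W) := by
  have hF := fit_char (e_ - b + 1) (by omega) j (by omega)
  have hfit2 : (b + 2 ^ j.toNat - 1 ≤ e_) ↔ j ≤ pyBitLength (e_ - b + 1) - 1 := by omega
  have hmod : (PySem.Int.mod b (2 ^ j.toNat) = 0) ↔ ((2 : Int) ^ j.toNat ∣ b) :=
    PySem.Int.mod_eq_zero_iff_dvd _ _
  by_cases hb : b = 0
  · have hd0 : PySem.Int.mod b (2 ^ j.toNat) = 0 := by
      rw [hmod, hb]
      exact dvd_zero _
    simp only [blockExp]
    rw [if_neg (not_not.mpr hb)]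
    constructor
    · rintro ⟨hW, -, hfit⟩
      rw [hfit2] at hfit
      split_ifs <;> omega
    · intro h
      split_ifs at h with h0
      · exact ⟨by omega, hd0, by rw [hfit2]; omega⟩
      · omega
  · have hA := align_char b hb j (by omega)
    rw [hmod, hA, hfit2]
    simp only [blockExp]
    rw [if_pos hb]
    split_ifs <;> omega

theorem inner_eq (b e_ W : Int) (hbe : b ≤ e_) : ∀ (i : Int), 1 ≤ i →
    i ≤ blockExp b e_ W + 1 → r2pInner b e_ W i = blockExp b e_ W + 1 := by
  have hE := blockExp_nonneg b e_ W
  intro i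
  induction i using r2pInner.induct (begin := b) (end_ := e_) (W := W) with
  | case1 i hiW hbrk =>
    intro h1 h2
    rw [r2pInner, dif_pos hiW, if_pos hbrk]
    have hc := cont_char b e_ W hbe i h1
    by_contra hne
    have hcont := hc.mpr (by omega)
    rcases hbrk with hm | hgt
    · exact hm hcont.2.1
    · omega
  | case2 i hiW hbrk ih =>
    intro h1 h2
    rw [r2pInner, dif_pos hiW, if_neg hbrk]
    rw [not_or, not_lt] at hbrk
    rw [Ne, not_not] at hbrk
    by_cases hlast : i + 1 ≤ blockExp b e_ W + 1
    · exact ih (by omega) hlast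
    · have hci := (cont_char b e_ W hbe i h1).mp ⟨hiW, hbrk.1, by omega⟩
      exact absurd hci (by omega)
  | case3 i hiW =>
    intro h1 h2
    rw [r2pInner, dif_neg hiW]
    have hc := cont_char b e_ W hbe i h1
    by_contra hne
    have hcont := hc.mpr (by omega)
    exact hiW hcont.1

theorem outer_eq (e_ W : Int) (b : Int) (addr mask : List Int) :
    r2pOuter b e_ W addr mask = (addr ++ (r2pLoop b e_ W).1, mask ++ (r2pLoop b e_ W).2) := by
  induction b, addr, mask using r2pOuter.induct (end_ := e_) (W := W) with
  | case1 b addr mask hbe _i ih =>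
    have hi : r2pInner b e_ W 1 = blockExp b e_ W + 1 :=
      inner_eq b e_ W hbe 1 (by omega) (by have := blockExp_nonneg b e_ W; omega)
    have hi1 : r2pInner b e_ W 1 - 1 = blockExp b e_ W := by omega
    have h_i2 : _i = blockExp b e_ W + 1 := hi
    have e1 : blockExp b e_ W + 1 - 1 = blockExp b e_ W := by omega
    have e2 : W - (blockExp b e_ W + 1) + 1 = W - blockExp b e_ W := by omega
    rw [r2pOuter, dif_pos hbe]
    conv_rhs => rw [r2pLoop, dif_pos hbe]
    simp only [h_i2, hi, e1, e2] at ih ⊢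
    rw [ih]
    simp
  | case2 b addr mask hbe =>
    rw [r2pOuter, dif_neg hbe]
    conv_rhs => rw [r2pLoop, dif_neg hbe]
    simp

-- ===== VERDICT (by name: the statement is the Claim_ definition above) =====
theorem range2prefix_spec : Claim_equal_range2prefix := by
  intro b e_ W _
  unfold Spec_range2prefix range2prefix range2prefix_alt
  simp [outer_eq]
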